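-- pv_equiv track=rewrite | github.com/Agentic-Environmental-Engineering/GymVerse | gem/gem/envs/RLVE/distinct_array_permutation_env.py | _is_valid_permutation
-- ===== SOURCE A (Python) =====
-- from typing import Any, List, Optional, SupportsFloat, Tuple
--
-- def _is_valid_permutation(arr_a: List[int], arr_b: List[int]) -> bool:
--     """
--     Check if arr_b is a valid permutation that satisfies the condition that
--     for every non-empty proper subset S of indices, sum_A(S) != sum_B(S).
--     """
--     n = len(arr_a)
--
--     # Check if it's actually a permutation
--     if sorted(arr_a) != sorted(arr_b):
--         return False
--
--     # Check all non-empty proper subsets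
--     for mask in range(1, (1 << n) - 1):
--         sum_a = 0
--         sum_b = 0
--         for i in range(n):
--             if mask & (1 << i):
--                 sum_a += arr_a[i]
--                 sum_b += arr_b[i]
--         if sum_a == sum_b:
--             return False
--
--     return True
-- ===== SOURCE B (Python) =====
-- def _is_valid_permutation(arr_a, arr_b):
--     """Meet-in-the-middle on differences d_i = a_i - b_i: the permutation is
--     valid iff no non-empty proper index subset has zero difference-sum."""
--     if sorted(arr_a) != sorted(arr_b):
--         return False
--     d = [a - b for a, b in zip(arr_a, arr_b)]
--     half = len(d) // 2
--     left, right = d[:half], d[half:]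
--
--     def subset_sums(xs):
--         sums = [0]
--         for x in xs:
--             sums = sums + [s + x for s in sums]
--         return sums
--
--     right_count = {}
--     for s in subset_sums(right):
--         right_count[s] = right_count.get(s, 0) + 1
--     zero_subsets = sum(right_count.get(-s, 0) for s in subset_sums(left))
--     # under a permutation the empty and the full subset always sum to zero;
--     # any further zero-sum subset is a violating proper subset
--     return zero_subsets <= 2
-- ===== Notes on version B (the rewrite author's own statement) =====
-- stated objective: alternative
-- what changed: Replaces A's scan of all 2^n index masks (recomputing both subset sums per mask) by meet-in-the-middle on the differences d_i = a_i - b_i: build the subset-sum lists of the two halves, count zero-sum combinations through a hash counter, and accept iff only the empty and full subsets sum to zero.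
import Mathlib
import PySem

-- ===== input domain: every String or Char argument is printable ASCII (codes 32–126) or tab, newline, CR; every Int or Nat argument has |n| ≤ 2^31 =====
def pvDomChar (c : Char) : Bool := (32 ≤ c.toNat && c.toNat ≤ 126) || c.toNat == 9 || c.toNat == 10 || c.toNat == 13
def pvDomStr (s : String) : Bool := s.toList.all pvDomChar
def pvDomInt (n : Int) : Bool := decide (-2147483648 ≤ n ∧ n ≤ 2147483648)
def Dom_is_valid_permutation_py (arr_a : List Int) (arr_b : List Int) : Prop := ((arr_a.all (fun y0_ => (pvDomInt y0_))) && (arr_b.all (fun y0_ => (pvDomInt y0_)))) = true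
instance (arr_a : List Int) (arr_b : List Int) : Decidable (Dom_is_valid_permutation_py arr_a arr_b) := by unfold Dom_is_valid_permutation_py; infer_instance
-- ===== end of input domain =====

-- B replaces A's exhaustive scan over all index masks by meet-in-the-middle on the
-- differences d_i = a_i - b_i (objective: alternative algorithm).

-- ===== PORT A =====
-- for mask in range(1, (1<<n)-1): recompute both subset sums, reject on equality
def is_valid_permutation_py (arr_a : List Int) (arr_b : List Int) : Bool :=
  let n := arr_a.length
  if PySem.List.sorted arr_a (fun x => x) false ≠ PySem.List.sorted arr_b (fun x => x) false then
    false
  else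
    (PySem.List.pyRange 1 (((1 <<< n : Nat) : Int) - 1) 1).all (fun mask =>
      let p := (PySem.List.pyRange 0 (n : Int) 1).foldl
        (fun sab i =>
          if PySem.Int.band mask ((1 : Int) <<< i.toNat) ≠ 0 then
            (sab.1 + PySem.List.pyGetD arr_a i 0, sab.2 + PySem.List.pyGetD arr_b i 0)
          else sab) ((0 : Int), (0 : Int))
      p.1 != p.2)

-- ===== PORT B =====
-- subset_sums of Source B: doubling fold, sums = sums + [s + x for s in sums]
def pvSubsums (xs : List Int) : List Int :=
  xs.foldl (fun sums x => sums ++ sums.map (fun s => s + x)) [0]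

def is_valid_permutation_py_alt (arr_a : List Int) (arr_b : List Int) : Bool :=
  if PySem.List.sorted arr_a (fun x => x) false ≠ PySem.List.sorted arr_b (fun x => x) false then
    false
  else
    let d := (arr_a.zip arr_b).map (fun p => p.1 - p.2)
    let half := PySem.Int.floordiv (PySem.List.len d) 2
    let left := PySem.List.slice d none (some half)
    let right := PySem.List.slice d (some half) none
    let rc := (pvSubsums right).foldl
      (fun dd s => dd.insert s (dd.getD s 0 + 1)) (PySem.Dict.empty : PySem.Dict Int Int)
    let zero := ((pvSubsums left).map (fun s => rc.getD (-s) 0)).sum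
    decide (zero ≤ 2)

-- ===== PRECONDITION & SPEC =====
def Spec_is_valid_permutation_py (arr_a : List Int) (arr_b : List Int) (out : Bool) : Prop := out = is_valid_permutation_py_alt arr_a arr_b
instance (arr_a : List Int) (arr_b : List Int) (out : Bool) : Decidable (Spec_is_valid_permutation_py arr_a arr_b out) := by unfold Spec_is_valid_permutation_py; infer_instance

-- ===== CLAIM (what is proved, stated in full; the proofs are below) =====
def Claim_equal_is_valid_permutation_py : Prop := ∀ (arr_a : List Int) (arr_b : List Int), Dom_is_valid_permutation_py arr_a arr_b → Spec_is_valid_permutation_py arr_a arr_b (is_valid_permutation_py arr_a arr_b)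

-- ===== LEMMAS AND PROOFS =====

-- sum of xs over the set bits of a mask, least-significant bit first
def pvMaskSum : List Int → Nat → Int
  | [], _ => 0
  | y :: ys, m => (if m % 2 = 1 then y else 0) + pvMaskSum ys (m / 2)

theorem pvMaskSum_zero (xs : List Int) : pvMaskSum xs 0 = 0 := by
  induction xs with
  | nil => rfl
  | cons y ys ih => simp [pvMaskSum, ih]

theorem pvMaskSum_all (xs : List Int) : pvMaskSum xs (2 ^ xs.length - 1) = xs.sum := by
  induction xs with
  | nil => rfl
  | cons y ys ih =>
      have hpos : 2 ^ ys.length ≥ 1 := Nat.one_le_two_pow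
      have h1 : (2 ^ (ys.length + 1) - 1) % 2 = 1 := by omega
      have h2 : (2 ^ (ys.length + 1) - 1) / 2 = 2 ^ ys.length - 1 := by omega
      simp [pvMaskSum, List.length_cons, h1, h2, ih]

-- MITM count identity: zeros of the combined table = Σ over the left table of matches in the right table
theorem pv_foldl_count (r : List Int) : ∀ (S : List Int) (t : Int),
    (((r.foldl (fun sums x => sums ++ sums.map (fun s => s + x)) S).count t : Int))
      = (S.map (fun s => ((pvSubsums r).count (t - s) : Int))).sum := by
  induction r with
  | nil =>
      intro S t
      have h0 : ∀ s : Int, ((([0] : List Int).count (t - s)) : Int) = if s == t then (1:Int) else 0 := by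
        intro s
        by_cases h : s = t
        · simp [h]
        · have hne : (t - s) ∉ ([0] : List Int) := by simp; omega
          simp [h, List.count_eq_zero.mpr hne]
      simp only [List.foldl_nil, pvSubsums, h0]
      rw [PySem.List.sum_map_ite_one_zero]
      simp [List.count]
  | cons x r' ih =>
      intro S t
      have hsub : pvSubsums (x :: r') = r'.foldl (fun sums x => sums ++ sums.map (fun s => s + x)) [0, 0 + x] := by
        simp [pvSubsums]
      have hc : ∀ t' : Int, ((pvSubsums (x :: r')).count t' : Int)
          = ((pvSubsums r').count (t' - 0) : Int) + ((pvSubsums r').count (t' - (0 + x)) : Int) := by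
        intro t'
        rw [hsub, ih [0, 0 + x] t']
        simp
      simp only [List.foldl_cons]
      rw [ih]
      simp only [List.map_append, List.map_map, List.sum_append, hc]
      have h1 : (S.map (fun s => ((pvSubsums r').count (t - s - 0) : Int) + ((pvSubsums r').count (t - s - (0 + x)) : Int))).sum
          = (S.map (fun s => ((pvSubsums r').count (t - s - 0) : Int))).sum
            + (S.map (fun s => ((pvSubsums r').count (t - s - (0 + x)) : Int))).sum := by
        exact PySem.List.sum_map_add_int _ _ _
      simp only [sub_zero, zero_add] at *
      rw [h1]
      have h2 : S.map ((fun s => ((pvSubsums r').count (t - s) : Int)) ∘ fun s => s + x)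
          = S.map (fun s => ((pvSubsums r').count (t - s - x) : Int)) := by
        apply List.map_congr_left; intro s _; simp [sub_sub]
      rw [h2]

theorem pv_flatMap_range_two_mul (k : Nat) (f : Nat → List Int) :
    (List.range (2 * k)).flatMap f = (List.range k).flatMap (fun j => f (2 * j) ++ f (2 * j + 1)) := by
  induction k with
  | zero => simp
  | succ k ih =>
      have h : 2 * (k + 1) = (2 * k + 1) + 1 := by ring
      rw [h, List.range_succ, List.range_succ, List.range_succ]
      simp only [List.flatMap_append, ih, List.flatMap_cons, List.flatMap_nil, List.append_nil,
        List.append_assoc]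

theorem pv_subsums_gen (ys : List Int) : ∀ (S : List Int),
    ys.foldl (fun sums x => sums ++ sums.map (fun s => s + x)) S
      = (List.range (2 ^ ys.length)).flatMap (fun m => S.map (fun s => s + pvMaskSum ys m)) := by
  induction ys with
  | nil => intro S; simp [pvMaskSum]
  | cons x ys ih =>
      intro S
      have e1 : ∀ j : Nat, pvMaskSum (x :: ys) (2 * j) = pvMaskSum ys j := by
        intro j
        have h1 : (2 * j) % 2 = 0 := by omega
        have h2 : (2 * j) / 2 = j := by omega
        simp [pvMaskSum, h1, h2]
      have e2 : ∀ j : Nat, pvMaskSum (x :: ys) (2 * j + 1) = x + pvMaskSum ys j := by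
        intro j
        have h1 : (2 * j + 1) % 2 = 1 := by omega
        have h2 : (2 * j + 1) / 2 = j := by omega
        simp [pvMaskSum, h1, h2]
      have hp : 2 ^ (x :: ys).length = 2 * 2 ^ ys.length := by
        simp [List.length_cons, pow_succ]; ring
      rw [List.foldl_cons, ih, hp, pv_flatMap_range_two_mul]
      apply List.flatMap_congr
      intro j _
      simp only [List.map_append, List.map_map, e1, e2]
      congr 1
      apply List.map_congr_left; intro s _; simp [add_assoc]

-- the subset-sum table lists pvMaskSum over all masks, in mask order
theorem pvSubsums_eq_map (xs : List Int) :
    pvSubsums xs = (List.range (2 ^ xs.length)).map (pvMaskSum xs) := by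
  rw [pvSubsums, pv_subsums_gen]
  simp only [List.map_cons, List.map_nil, zero_add]
  generalize (List.range (2 ^ xs.length)) = L
  induction L with
  | nil => rfl
  | cons a L ih => simp [ih]

-- pvMaskSum as a sum over indices
theorem pvMaskSum_eq_sum (xs : List Int) : ∀ (m : Nat),
    pvMaskSum xs m
      = ((List.range xs.length).map (fun i => if m.testBit i then xs.getD i 0 else 0)).sum := by
  induction xs with
  | nil => intro m; simp [pvMaskSum]
  | cons y ys ih =>
      intro m
      rw [List.length_cons, List.range_succ_eq_map]
      simp only [List.map_cons, List.map_map, List.sum_cons, Function.comp_def,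
        Nat.succ_eq_add_one, Nat.testBit_add_one, Nat.testBit_zero,
        List.getD_cons_succ, List.getD_cons_zero]
      rw [pvMaskSum, ih (m / 2)]
      by_cases hm : m % 2 = 1 <;> simp [hm]

-- A's inner loop computes the two masked sums
theorem pv_inner_gen (a b : List Int) (m : Nat) (n : Nat) :
    (List.range n).foldl
        (fun (sab : Int × Int) (i : Nat) =>
          if PySem.Int.band (m : Int) ((1 : Int) <<< ((((i : Int)).toNat : Nat) : Int)) ≠ 0 then
            (sab.1 + PySem.List.pyGetD a (i : Int) 0, sab.2 + PySem.List.pyGetD b (i : Int) 0)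
          else sab) ((0 : Int), (0 : Int))
      = (((List.range n).map (fun i => if m.testBit i then a.getD i 0 else 0)).sum,
         ((List.range n).map (fun i => if m.testBit i then b.getD i 0 else 0)).sum) := by
  induction n with
  | zero => simp
  | succ n ih =>
      rw [List.range_succ]
      simp only [List.foldl_append, List.foldl_cons, List.foldl_nil, ih,
        List.map_append, List.sum_append, List.map_cons, List.map_nil, List.sum_cons,
        List.sum_nil, add_zero]
      have hc : (PySem.Int.band (m : Int) ((1 : Int) <<< ((n : Nat) : Int)) ≠ 0) ↔ m.testBit n := by
        rw [show ((1 : Int) <<< ((n : Nat) : Int)) = ((2 ^ n : Nat) : Int) by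
            rw [show (1 : Int) <<< ((n : Nat) : Int) = ((Nat.shiftLeft' false 1 n : Nat) : Int) from rfl,
              Nat.shiftLeft'_false, Nat.shiftLeft_eq, one_mul],
          PySem.Int.band_natCast, ne_eq, Int.natCast_eq_zero, Nat.and_two_pow]
        by_cases h : m.testBit n <;> simp [h, Nat.pow_eq_zero]
      by_cases ht : m.testBit n
      · rw [if_pos (by simp only [Int.toNat_natCast]; exact hc.mpr ht)]
        simp [ht, PySem.List.pyGetD_natCast, List.getD]
      · rw [if_neg (by simp only [Int.toNat_natCast]; exact fun hcon => ht (hc.mp hcon))]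
        simp [ht]

-- A's inner loop over the python range, in port form
theorem pv_inner_py (a b : List Int) (m : Nat) :
    (PySem.List.pyRange 0 ((a.length : Nat) : Int) 1).foldl
        (fun (sab : Int × Int) (i : Int) =>
          if PySem.Int.band (m : Int) ((1 : Int) <<< ((i.toNat : Nat) : Int)) ≠ 0 then
            (sab.1 + PySem.List.pyGetD a i 0, sab.2 + PySem.List.pyGetD b i 0)
          else sab) ((0 : Int), (0 : Int))
      = (((List.range a.length).map (fun i => if m.testBit i then a.getD i 0 else 0)).sum,
         ((List.range a.length).map (fun i => if m.testBit i then b.getD i 0 else 0)).sum) := by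
  rw [PySem.List.pyRange_zero_natCast, List.foldl_map]
  exact pv_inner_gen a b m a.length

-- sums of elementwise differences split
theorem pv_sum_map_sub (l : List Nat) (f g : Nat → Int) :
    (l.map (fun i => f i - g i)).sum = (l.map f).sum - (l.map g).sum := by
  induction l with
  | nil => simp
  | cons x xs ih => simp [ih]; ring

theorem pv_zip_sub_sum (a : List Int) : ∀ (b : List Int), a.length = b.length →
    ((a.zip b).map (fun p => p.1 - p.2)).sum = a.sum - b.sum := by
  induction a with
  | nil => intro b h; cases b <;> simp at h ⊢
  | cons x xs ih =>
      intro b h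
      cases b with
      | nil => simp at h
      | cons y ys =>
          simp only [List.zip_cons_cons, List.map_cons, List.sum_cons, List.length_cons] at h ⊢
          rw [ih ys (by omega)]
          ring

-- ===== VERDICT (by name: the statement is the Claim_ definition above) =====
theorem is_valid_permutation_py_spec : Claim_equal_is_valid_permutation_py := by
  intro arr_a arr_b _
  show is_valid_permutation_py arr_a arr_b = is_valid_permutation_py_alt arr_a arr_b
  by_cases hs : PySem.List.sorted arr_a (fun x => x) false = PySem.List.sorted arr_b (fun x => x) false
  case neg => simp [is_valid_permutation_py, is_valid_permutation_py_alt, hs]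
  case pos =>
  have hperm : arr_a.Perm arr_b := by
    have h1 := PySem.List.sorted_perm arr_a (fun x => x) false
    have h2 := PySem.List.sorted_perm arr_b (fun x => x) false
    exact h1.symm.trans (hs ▸ h2)
  have hlen : arr_b.length = arr_a.length := hperm.length_eq.symm
  have hsum : arr_a.sum = arr_b.sum := hperm.sum_eq
  set n := arr_a.length with hn
  set d : List Int := (arr_a.zip arr_b).map (fun p => p.1 - p.2) with hd
  have hdlen : d.length = n := by simp [hd, List.length_zip, hlen, hn]
  have hdsum : d.sum = 0 := by rw [hd, pv_zip_sub_sum arr_a arr_b hlen.symm]; omega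
  -- ---- B reduces to a zero count over the full subset-sum table ----
  have hB : is_valid_permutation_py_alt arr_a arr_b = decide ((pvSubsums d).count 0 ≤ 2) := by
    unfold is_valid_permutation_py_alt
    rw [if_neg (not_not_intro hs)]
    have hhalf : PySem.Int.floordiv (PySem.List.len d) 2 = ((d.length / 2 : Nat) : Int) := by
      rw [PySem.List.len_eq]
      exact_mod_cast PySem.Int.floordiv_natCast d.length 2
    rw [← hd]
    simp only [hhalf, PySem.List.slice_to_natCast, PySem.List.slice_from_natCast,
      PySem.Dict.foldl_insert_getD_add_one_eq_counter, PySem.Dict.getD_counter]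
    have hz := pv_foldl_count (d.drop (d.length / 2)) (pvSubsums (d.take (d.length / 2))) 0
    simp only [zero_sub] at hz
    have hjoin : (d.drop (d.length / 2)).foldl (fun sums x => sums ++ sums.map (fun s => s + x))
        (pvSubsums (d.take (d.length / 2))) = pvSubsums d := by
      rw [pvSubsums, pvSubsums, ← List.foldl_append, List.take_append_drop]
    rw [hjoin] at hz
    rw [← hz, decide_eq_decide]
    exact_mod_cast Iff.rfl
  -- ---- the masked difference-sum ----
  have hkey : ∀ m : Nat, pvMaskSum d m
      = ((List.range n).map (fun i => if m.testBit i then arr_a.getD i 0 else 0)).sum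
        - ((List.range n).map (fun i => if m.testBit i then arr_b.getD i 0 else 0)).sum := by
    intro m
    rw [pvMaskSum_eq_sum d m, hdlen]
    rw [List.map_congr_left (g := fun i =>
        (if m.testBit i then arr_a.getD i 0 else 0) - (if m.testBit i then arr_b.getD i 0 else 0))
      (by
        intro i hi
        have hin : i < n := List.mem_range.mp hi
        have hia : i < arr_a.length := hin
        have hib : i < arr_b.length := by omega
        have hid : i < d.length := by omega
        by_cases hb : m.testBit i
        · simp only [hb, if_pos]
          rw [List.getD_eq_getElem d 0 hid, List.getD_eq_getElem arr_a 0 hia,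
            List.getD_eq_getElem arr_b 0 hib]
          simp [hd]
        · simp [hb])]
    exact pv_sum_map_sub _ _ _
  -- ---- A reduces to: no mask strictly between the empty and the full one hits zero ----
  have hAiff : (is_valid_permutation_py arr_a arr_b = true)
      ↔ (∀ m : Nat, 1 ≤ m → m < 2 ^ n - 1 → pvMaskSum d m ≠ 0) := by
    unfold is_valid_permutation_py
    rw [if_neg (not_not_intro hs), List.all_eq_true]
    simp only [← hn]
    have hinner : ∀ mm : Nat,
        (PySem.List.pyRange 0 ((n : Nat) : Int) 1).foldl
            (fun (sab : Int × Int) (i : Int) =>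
              if PySem.Int.band (mm : Int) ((1 : Int) <<< ((i.toNat : Nat) : Int)) ≠ 0 then
                (sab.1 + PySem.List.pyGetD arr_a i 0, sab.2 + PySem.List.pyGetD arr_b i 0)
              else sab) ((0 : Int), (0 : Int))
          = (((List.range n).map (fun i => if mm.testBit i then arr_a.getD i 0 else 0)).sum,
             ((List.range n).map (fun i => if mm.testBit i then arr_b.getD i 0 else 0)).sum) := by
      intro mm
      rw [hn]
      exact pv_inner_py arr_a arr_b mm
    constructor
    · intro h m h1 h2
      have hmem : ((m : Int)) ∈ PySem.List.pyRange 1 (((1 <<< n : Nat) : Int) - 1) 1 := by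
        rw [PySem.List.mem_pyRange_one, Nat.one_shiftLeft]
        constructor
        · exact_mod_cast h1
        · omega
      have hm := h _ hmem
      simp only [hinner, bne_iff_ne, ne_eq] at hm
      rw [hkey m]
      intro hzero
      exact hm (by omega)
    · intro h mask hmem
      rw [PySem.List.mem_pyRange_one, Nat.one_shiftLeft] at hmem
      obtain ⟨h1, h2⟩ := hmem
      have h0 : 0 ≤ mask := by omega
      have hcast : mask = ((mask.toNat : Nat) : Int) := by omega
      rw [hcast]
      simp only [hinner, bne_iff_ne, ne_eq]
      have hne := h mask.toNat (by omega) (by omega)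
      rw [hkey mask.toNat] at hne
      intro heq
      exact hne (by omega)
  -- ---- counting: the loop finds no zero iff only the empty and full masks hit zero ----
  have hfull : pvMaskSum d (2 ^ n - 1) = 0 := by
    have h := pvMaskSum_all d
    rw [hdlen] at h
    rw [h, hdsum]
  have hzero := pvMaskSum_zero d
  have hcnt : (pvSubsums d).count 0 = (List.range (2 ^ n)).countP (fun m => pvMaskSum d m == 0) := by
    rw [pvSubsums_eq_map, hdlen]
    simp [List.count, List.countP_map]
    rfl
  rw [hB, Bool.eq_iff_iff, hAiff, decide_eq_true_eq, hcnt]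
  by_cases hn0 : n = 0
  · rw [hn0]
    constructor
    · intro _
      have hle := List.countP_le_length (l := List.range (2 ^ 0)) (p := fun m => pvMaskSum d m == 0)
      simp only [List.length_range] at hle
      omega
    · intro _ m h1 h2
      simp at h2
  · have hK : 2 ≤ 2 ^ n := by
      have h1 := Nat.one_lt_two_pow_iff.mpr hn0
      omega
    have hsplit : List.range (2 ^ n) = 0 :: (List.range' 1 (2 ^ n - 2) ++ [2 ^ n - 1]) := by
      rw [List.range_eq_range', show 2 ^ n = (2 ^ n - 1) + 1 from by omega, List.range'_succ]
      congr 1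
      rw [show 2 ^ n - 1 = (2 ^ n - 2) + 1 from by omega, List.range'_1_concat]
      congr 2
      omega
    rw [hsplit]
    simp only [List.countP_cons, List.countP_append, List.countP_nil, hzero, hfull,
      beq_self_eq_true, if_pos, zero_add]
    constructor
    · intro h
      have hmid : (List.range' 1 (2 ^ n - 2)).countP (fun m => pvMaskSum d m == 0) = 0 := by
        apply List.countP_eq_zero.mpr
        intro m hm
        rw [List.mem_range'_1] at hm
        have hne := h m hm.1 (by omega)
        simp [hne]
      omega
    · intro h m h1 h2 hz
      have hmem : m ∈ List.range' 1 (2 ^ n - 2) := List.mem_range'_1.mpr ⟨h1, by omega⟩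
      have hpos : 0 < (List.range' 1 (2 ^ n - 2)).countP (fun m => pvMaskSum d m == 0) :=
        List.countP_pos_iff.mpr ⟨m, hmem, by simp [hz]⟩
      omega
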